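-- pv_equiv track=rewrite | github.com/CyberBridgeEU/cyberbridge | cti/service/app/services/scanner_results_service.py | _parse_osv_labels
-- ===== SOURCE A (Python) =====
-- def _parse_osv_labels(labels: list[str]) -> tuple[str, str, str]:
--     ecosystem = ""
--     severity = ""
--     vuln_id = ""
--     for lbl in labels:
--         if lbl.startswith("osv-ecosystem-"):
--             ecosystem = lbl.replace("osv-ecosystem-", "")
--         elif lbl.startswith("osv-severity-"):
--             severity = lbl.replace("osv-severity-", "").capitalize()
--         elif lbl.startswith("osv-id-"):
--             vuln_id = lbl.replace("osv-id-", "").upper()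
--     return ecosystem, severity, vuln_id
-- ===== SOURCE B (Python) =====
-- def _parse_osv_labels(labels: list[str]) -> tuple[str, str, str]:
--     def last_with(prefix):
--         for lbl in reversed(labels):
--             if lbl.startswith(prefix):
--                 return lbl
--         return None
--     e = last_with("osv-ecosystem-")
--     s = last_with("osv-severity-")
--     v = last_with("osv-id-")
--     return (
--         e.replace("osv-ecosystem-", "") if e is not None else "",
--         s.replace("osv-severity-", "").capitalize() if s is not None else "",
--         v.replace("osv-id-", "").upper() if v is not None else "",
--     )
-- ===== Notes on version B (the rewrite author's own statement) =====
-- stated objective: simpler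
-- what changed: Replaces the single stateful loop with an elif-chain by three independent per-field scans: for each prefix take the last matching label (reverse scan, first hit) and apply that field's transform, defaulting to "".
import Mathlib
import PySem

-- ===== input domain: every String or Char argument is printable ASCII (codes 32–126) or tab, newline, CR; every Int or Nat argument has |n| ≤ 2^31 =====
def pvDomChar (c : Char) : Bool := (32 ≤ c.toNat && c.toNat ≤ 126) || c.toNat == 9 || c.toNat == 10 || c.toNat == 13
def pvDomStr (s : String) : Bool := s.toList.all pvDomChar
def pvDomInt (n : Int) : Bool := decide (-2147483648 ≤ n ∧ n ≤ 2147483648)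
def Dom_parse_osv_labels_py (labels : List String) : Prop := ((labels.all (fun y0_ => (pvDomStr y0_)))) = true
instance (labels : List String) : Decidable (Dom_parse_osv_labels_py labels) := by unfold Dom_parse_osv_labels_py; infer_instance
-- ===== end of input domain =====

-- B replaces A's single stateful loop with an elif-chain by three independent
-- per-field reverse scans (last matching label per prefix, then the field's
-- transform); objective: simpler decomposition, same O(n) cost.

-- ===== PORT A =====
-- str.capitalize() ported by hand (exact on the ASCII domain): first char uppercased, rest lowercased
def pyCapitalize (s : String) : String :=
  match s.toList with
  | [] => ""
  | c :: cs => String.ofList (PySem.Chars.upperChar c :: cs.map PySem.Chars.lowerChar)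

-- the body of A's for-loop (state = (ecosystem, severity, vuln_id))
def osvStep (st : String × String × String) (lbl : String) : String × String × String :=
  if PySem.Str.startswith lbl "osv-ecosystem-" then
    (PySem.Str.replace lbl "osv-ecosystem-" "", st.2.1, st.2.2)
  else if PySem.Str.startswith lbl "osv-severity-" then
    (st.1, pyCapitalize (PySem.Str.replace lbl "osv-severity-" ""), st.2.2)
  else if PySem.Str.startswith lbl "osv-id-" then
    (st.1, st.2.1, PySem.Str.upper (PySem.Str.replace lbl "osv-id-" ""))
  else st

def parse_osv_labels_py (labels : List String) : String × String × String :=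
  labels.foldl osvStep ("", "", "")

-- ===== PORT B =====
-- last label starting with the given prefix: scan the reversed list, first hit
def lastWith (labels : List String) (p : String) : Option String :=
  labels.reverse.find? (fun lbl => PySem.Str.startswith lbl p)

def parse_osv_labels_py_alt (labels : List String) : String × String × String :=
  ((lastWith labels "osv-ecosystem-").elim "" (fun l => PySem.Str.replace l "osv-ecosystem-" ""),
   (lastWith labels "osv-severity-").elim "" (fun l => pyCapitalize (PySem.Str.replace l "osv-severity-" "")),
   (lastWith labels "osv-id-").elim "" (fun l => PySem.Str.upper (PySem.Str.replace l "osv-id-" "")))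

-- ===== PRECONDITION & SPEC =====
def Spec_parse_osv_labels_py (labels : List String) (out : String × String × String) : Prop := out = parse_osv_labels_py_alt labels
instance (labels : List String) (out : String × String × String) : Decidable (Spec_parse_osv_labels_py labels out) := by unfold Spec_parse_osv_labels_py; infer_instance

-- ===== CLAIM (what is proved, stated in full; the proofs are below) =====
def Claim_equal_parse_osv_labels_py : Prop := ∀ (labels : List String), Dom_parse_osv_labels_py labels → Spec_parse_osv_labels_py labels (parse_osv_labels_py labels)

-- ===== LEMMAS AND PROOFS =====

-- the three prefixes are pairwise non-comparable, so the startswith tests are mutually exclusive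
theorem startswith_excl (lbl p q : String)
    (h : ¬ p.toList <+: q.toList) (h' : ¬ q.toList <+: p.toList)
    (hp : PySem.Str.startswith lbl p = true) : PySem.Str.startswith lbl q = false := by
  by_contra hq
  rw [Bool.not_eq_false] at hq
  rw [PySem.Str.startswith_eq, PySem.Chars.startswith_iff] at hp hq
  rcases List.prefix_or_prefix_of_prefix hp hq with hc | hc
  · exact h hc
  · exact h' hc

theorem lastWith_append (labels : List String) (x p : String) :
    lastWith (labels ++ [x]) p =
      if PySem.Str.startswith x p then some x else lastWith labels p := by
  cases h : PySem.Chars.startswith x.toList p.toList <;>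
    simp [lastWith, List.reverse_append, h]

-- loop invariant: A's fold from an arbitrary state equals the three per-field last matches
theorem foldl_eq_lastWith (labels : List String) (e s v : String) :
    labels.foldl osvStep (e, s, v) =
      ((lastWith labels "osv-ecosystem-").elim e (fun l => PySem.Str.replace l "osv-ecosystem-" ""),
       (lastWith labels "osv-severity-").elim s (fun l => pyCapitalize (PySem.Str.replace l "osv-severity-" "")),
       (lastWith labels "osv-id-").elim v (fun l => PySem.Str.upper (PySem.Str.replace l "osv-id-" ""))) := by
  induction labels using List.reverseRecOn with
  | nil => simp [lastWith]
  | append_singleton xs x ih =>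
    rw [List.foldl_append, ih]
    simp only [lastWith_append, List.foldl_cons, List.foldl_nil]
    by_cases h1 : PySem.Str.startswith x "osv-ecosystem-"
    · have h2 := startswith_excl x "osv-ecosystem-" "osv-severity-" (by decide) (by decide) h1
      have h3 := startswith_excl x "osv-ecosystem-" "osv-id-" (by decide) (by decide) h1
      simp at h1 h2 h3
      simp [osvStep, h1, h2, h3]
    · by_cases h2 : PySem.Str.startswith x "osv-severity-"
      · have h3 := startswith_excl x "osv-severity-" "osv-id-" (by decide) (by decide) h2
        simp at h1 h2 h3
        simp [osvStep, h1, h2, h3]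
      · by_cases h3 : PySem.Str.startswith x "osv-id-"
        · simp at h1 h2 h3
          simp [osvStep, h1, h2, h3]
        · simp at h1 h2 h3
          simp [osvStep, h1, h2, h3]

-- ===== VERDICT (by name: the statement is the Claim_ definition above) =====
theorem parse_osv_labels_py_spec : Claim_equal_parse_osv_labels_py := by
  intro labels _
  unfold Spec_parse_osv_labels_py parse_osv_labels_py parse_osv_labels_py_alt
  rw [foldl_eq_lastWith]
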